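-- pv_equiv track=rewrite | github.com/JKirchartz/cloudbot-to-pinhook | plugins/munger.py | vaporwave
-- ===== SOURCE A (Python) =====
-- def vaporwave(text):
--     output = ""
--     for c in list(text):
--         a = ord(c)
--         if a >= 33 and a <= 126:
--             output += chr( (a - 33) + 65281 )
--         else:
--             output += c
--     return output
-- ===== SOURCE B (Python) =====
-- def vaporwave(text):
--     n = len(text)
--     if n == 0:
--         return ""
--     if n == 1:
--         o = ord(text)
--         return chr(o + 0xFEE0) if 33 <= o <= 126 else text
--     mid = n // 2
--     return vaporwave(text[:mid]) + vaporwave(text[mid:])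
-- ===== Notes on version B (the rewrite author's own statement) =====
-- stated objective: alternative
-- what changed: Replaced the linear accumulator loop with if/else and string concatenation by a divide-and-conquer recursion that splits the string in halves, converting a single character arithmetically (code + 0xFEE0) at the base case.
import Mathlib
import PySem

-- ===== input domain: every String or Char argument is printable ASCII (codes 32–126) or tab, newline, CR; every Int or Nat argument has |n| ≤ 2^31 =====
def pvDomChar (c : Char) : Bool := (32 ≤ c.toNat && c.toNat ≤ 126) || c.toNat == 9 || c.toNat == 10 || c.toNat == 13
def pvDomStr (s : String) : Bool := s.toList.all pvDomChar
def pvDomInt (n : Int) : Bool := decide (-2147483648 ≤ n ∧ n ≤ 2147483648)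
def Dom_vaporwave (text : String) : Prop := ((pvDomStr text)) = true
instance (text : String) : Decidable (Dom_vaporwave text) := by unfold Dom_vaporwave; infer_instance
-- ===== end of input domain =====

-- B replaces A's linear accumulator loop by a divide-and-conquer recursion on string halves,
-- converting one character arithmetically (code + 0xFEE0) at the base case (alternative decomposition).

-- ===== PORT A =====
def vaporwave (text : String) : String :=
  text.toList.foldl (fun output c =>
    let a : Int := (c.toNat : Int)
    if 33 ≤ a ∧ a ≤ 126 then output ++ String.singleton (Char.ofNat ((a - 33) + 65281).toNat)
    else output ++ String.singleton c) ""

-- ===== PORT B =====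
-- Source B recurses on the string splitting at mid = n // 2; text[:mid]/text[mid:] with
-- 0 ≤ mid ≤ n are exactly List.take mid / List.drop mid on the character list.
def vwAltL : List Char → List Char
  | [] => []
  | [c] =>
      if 33 ≤ (c.toNat : Int) ∧ (c.toNat : Int) ≤ 126 then
        [Char.ofNat (c.toNat + 0xFEE0)]
      else [c]
  | a :: b :: rest =>
      vwAltL ((a :: b :: rest).take ((a :: b :: rest).length / 2)) ++
      vwAltL ((a :: b :: rest).drop ((a :: b :: rest).length / 2))
termination_by l => l.length
decreasing_by
  · simp only [List.length_take, List.length_cons]; omega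
  · simp only [List.length_drop, List.length_cons]; omega

def vaporwave_alt (text : String) : String := String.ofList (vwAltL text.toList)

-- ===== PRECONDITION & SPEC =====
def Spec_vaporwave (text : String) (out : String) : Prop := out = vaporwave_alt text
instance (text : String) (out : String) : Decidable (Spec_vaporwave text out) := by unfold Spec_vaporwave; infer_instance

-- ===== CLAIM (what is proved, stated in full; the proofs are below) =====
def Claim_equal_vaporwave : Prop := ∀ (text : String), Dom_vaporwave text → Spec_vaporwave text (vaporwave text)

-- ===== LEMMAS AND PROOFS =====

def vwChar (c : Char) : Char :=
  if 33 ≤ (c.toNat : Int) ∧ (c.toNat : Int) ≤ 126 then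
    Char.ofNat (((c.toNat : Int) - 33) + 65281).toNat
  else c

theorem vwChar_base (c : Char) :
    (if 33 ≤ (c.toNat : Int) ∧ (c.toNat : Int) ≤ 126 then
      [Char.ofNat (c.toNat + 0xFEE0)] else [c]) = [vwChar c] := by
  unfold vwChar
  split_ifs with h
  · have : (((c.toNat : Int) - 33) + 65281).toNat = c.toNat + 0xFEE0 := by omega
    rw [this]
  · rfl

theorem vwAltL_eq_map (l : List Char) : vwAltL l = l.map vwChar := by
  induction l using vwAltL.induct with
  | case1 => rw [vwAltL]; rfl
  | case2 c _ => rw [vwAltL, vwChar_base]; rfl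
  | case3 c _ => rw [vwAltL, vwChar_base]; rfl
  | case4 a b rest ih1 ih2 =>
      rw [vwAltL, ih1, ih2, ← List.map_append, List.take_append_drop]

theorem vw_foldl_append (g : Char → Char) :
    ∀ (l : List Char) (s : String),
      l.foldl (fun o c => o ++ String.singleton (g c)) s = s ++ String.ofList (l.map g) := by
  intro l
  induction l with
  | nil => intro s; apply String.ext; simp
  | cons c l ih =>
    intro s
    simp only [List.foldl_cons, List.map_cons, ih]
    apply String.ext
    simp [String.singleton]

-- ===== VERDICT (by name: the statement is the Claim_ definition above) =====
theorem vaporwave_spec : Claim_equal_vaporwave := by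
  intro text _
  show vaporwave text = vaporwave_alt text
  unfold vaporwave vaporwave_alt
  have hfun : (fun (output : String) (c : Char) =>
      let a : Int := (c.toNat : Int)
      if 33 ≤ a ∧ a ≤ 126 then output ++ String.singleton (Char.ofNat ((a - 33) + 65281).toNat)
      else output ++ String.singleton c)
      = fun (o : String) (c : Char) => o ++ String.singleton (vwChar c) := by
    funext o c
    simp only [vwChar]
    split_ifs <;> rfl
  rw [hfun, vw_foldl_append, vwAltL_eq_map]
  apply String.ext
  simp
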